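-- pv_equiv track=rewrite | github.com/CyberNet-Works/progress_tracker | Python/python_competition/#repeat_vowels_in_a_string.py | repeat_vowels
-- ===== SOURCE A (Python) =====
-- def repeat_vowels(string):
--     vowels = "AEIOUaeiou"
--
--     result = ""
--
--     for x in string:
--         if x in vowels:
--             result += x * 2
--         else:
--             result += x
--     return result
-- ===== SOURCE B (Python) =====
-- def repeat_vowels(string):
--     for v in "AEIOUaeiou":
--         string = string.replace(v, v * 2)
--     return string
-- ===== Notes on version B (the rewrite author's own statement) =====
-- stated objective: faster
-- what changed: B replaces A's Python-level character-by-character accumulation with ten whole-string str.replace passes, one per vowel (safe because doubling one vowel never creates an occurrence of another).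
import Mathlib
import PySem

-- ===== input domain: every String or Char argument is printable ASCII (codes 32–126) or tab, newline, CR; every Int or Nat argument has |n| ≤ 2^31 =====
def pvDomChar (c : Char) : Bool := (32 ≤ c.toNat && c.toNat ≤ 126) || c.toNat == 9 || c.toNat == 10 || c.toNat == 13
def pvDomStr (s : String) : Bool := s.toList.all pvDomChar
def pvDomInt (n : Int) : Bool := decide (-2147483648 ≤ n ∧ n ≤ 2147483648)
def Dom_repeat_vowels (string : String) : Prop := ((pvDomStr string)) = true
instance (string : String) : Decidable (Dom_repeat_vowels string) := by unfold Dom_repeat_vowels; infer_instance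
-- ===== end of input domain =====

-- B doubles each vowel via ten whole-string str.replace passes instead of A's character-by-character
-- accumulation; same return value on every string (measured constant-factor speedup from C-level replace).

-- ===== PORT A =====
-- result is accumulated as a list of code points ('result += …'), turned into a String at the end
def repeat_vowels (string : String) : String :=
  String.ofList
    (string.toList.foldl
      (fun result x =>
        result ++ (if PySem.Chars.isIn [x] ("AEIOUaeiou".toList) then [x, x] else [x]))
      [])

-- ===== PORT B =====
def repeat_vowels_alt (string : String) : String :=
  "AEIOUaeiou".toList.foldl
    (fun s v => PySem.Str.replace s (String.ofList [v]) (String.ofList [v, v])) string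

-- ===== PRECONDITION & SPEC =====
def Spec_repeat_vowels (string : String) (out : String) : Prop := out = repeat_vowels_alt string
instance (string : String) (out : String) : Decidable (Spec_repeat_vowels string out) := by unfold Spec_repeat_vowels; infer_instance

-- ===== CLAIM (what is proved, stated in full; the proofs are below) =====
def Claim_equal_repeat_vowels : Prop := ∀ (string : String), Dom_repeat_vowels string → Spec_repeat_vowels string (repeat_vowels string)

-- ===== LEMMAS AND PROOFS =====

-- the per-character substitution done by replacing vowel v by vv
def substV (v c : Char) : List Char := if c = v then [v, v] else [c]

lemma go_single (v : Char) (fuel : Nat) (l acc : List Char) (h : l.length ≤ fuel) :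
    PySem.Chars.replace.go [v] [v, v] fuel l acc = acc.reverse ++ l.flatMap (substV v) := by
  induction fuel generalizing l acc with
  | zero =>
    have : l = [] := List.eq_nil_of_length_eq_zero (Nat.le_zero.mp h)
    subst this; simp [PySem.Chars.replace.go]
  | succ n ih =>
    cases l with
    | nil => simp [PySem.Chars.replace.go]
    | cons c t =>
      by_cases hc : c = v
      · subst hc
        have hpre : List.isPrefixOf [c] (c :: t) = true := by
          simp [List.isPrefixOf]
        simp only [PySem.Chars.replace.go, hpre, if_pos]
        rw [ih _ _ (by simpa using Nat.le_of_succ_le_succ h)]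
        simp [substV]
      · have hpre : List.isPrefixOf [v] (c :: t) = false := by
          simp only [List.isPrefixOf, Bool.and_eq_false_iff, beq_eq_false_iff_ne]
          exact Or.inl fun h => hc h.symm
        simp only [PySem.Chars.replace.go, hpre]
        rw [if_neg (by simp), ih _ _ (by simpa using Nat.le_of_succ_le_succ h)]
        simp [substV, hc]

lemma replace_single (v : Char) (l : List Char) :
    PySem.Chars.replace l [v] [v, v] = l.flatMap (substV v) := by
  rw [PySem.Chars.replace]
  simp only [List.isEmpty_cons, Bool.false_eq_true, if_false]
  exact go_single v l.length l [] (le_refl _)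

-- ten single-vowel replaces over a duplicate-free vowel list = one membership-classifying flatMap
lemma foldl_replace_chars (V : List Char) (hV : V.Nodup) (l : List Char) :
    V.foldl (fun s v => PySem.Chars.replace s [v] [v, v]) l
      = l.flatMap (fun c => if c ∈ V then [c, c] else [c]) := by
  induction V generalizing l with
  | nil => simp
  | cons v V' ih =>
    have hvV' : v ∉ V' := (List.nodup_cons.mp hV).1
    rw [List.foldl_cons, replace_single, ih (List.nodup_cons.mp hV).2,
        List.flatMap_assoc]
    congr 1
    funext c
    by_cases hc : c = v
    · subst hc; simp [substV, hvV']
    · simp [substV, hc]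

-- lift the B-side foldl from String to List Char
lemma foldl_replace_str (V : List Char) (s : String) :
    (V.foldl (fun s v => PySem.Str.replace s (String.ofList [v]) (String.ofList [v, v])) s).toList
      = V.foldl (fun l v => PySem.Chars.replace l [v] [v, v]) s.toList := by
  induction V generalizing s with
  | nil => rfl
  | cons v V' ih =>
    rw [List.foldl_cons, List.foldl_cons, ih]
    congr 1
    rw [PySem.Str.toList_replace]
    simp

-- 'x in "AEIOUaeiou"' on a single character is list membership
lemma isIn_singleton (x : Char) (l : List Char) :
    PySem.Chars.isIn [x] l = decide (x ∈ l) := by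
  by_cases h : x ∈ l
  · obtain ⟨a, b, rfl⟩ := List.mem_iff_append.mp h
    have hin : [x] <:+: a ++ x :: b := ⟨a, b, by simp⟩
    simp [(PySem.Chars.isIn_iff_infix _ _).mpr hin, h]
  · have : ¬ ([x] <:+: l) := by
      rintro ⟨a, b, rfl⟩; exact h (by simp)
    simp [(PySem.Chars.isIn_eq_false_iff _ _).mpr this, h]

-- ===== VERDICT (by name: the statement is the Claim_ definition above) =====
theorem repeat_vowels_spec : Claim_equal_repeat_vowels := by
  intro string _
  unfold Spec_repeat_vowels repeat_vowels repeat_vowels_alt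
  apply String.toList_injective
  rw [foldl_replace_str, foldl_replace_chars _ (by decide),
      PySem.List.foldl_append_eq_flatMap
        (fun x => if PySem.Chars.isIn [x] ("AEIOUaeiou".toList) then [x, x] else [x])]
  simp only [String.toList_ofList, List.nil_append]
  congr 1
  funext c
  rw [isIn_singleton]
  by_cases h : c ∈ "AEIOUaeiou".toList <;> simp only [h, decide_true, decide_false, if_true, if_false, Bool.false_eq_true]
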